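/- GENERATED by c/gen_decode.py: decode facts of the image, one per distinct instruction byte string. -/
import UserX.DecodeImage

#decode_all ProgX.Base.Dec
  "0f8662010000"  -- jbe 102a9b
  "4188910000c000"  -- mov BYTE PTR [r9+0xc00000],dl
  "4883c008"  -- add rax,0x8
  "4889c7"  -- mov rdi,rax
  "488d2c18"  -- lea rbp,[rax+rbx*1]
  "4983c001"  -- add r8,0x1
  "4c39fd"  -- cmp rbp,r15
  "660f28e0"  -- movapd xmm4,xmm0
  "7242"  -- jb 10025d
  "7502"  -- jne 1009d4
  "7d09"  -- jge 1022a4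
  "89fb"  -- mov ebx,edi
  "c6820000c000f9"  -- mov BYTE PTR [rdx+0xc00000],0xf9
  "e88dfcffff"  -- call 103800
  "e8e8040000"  -- call 104300
  "ebcf"  -- jmp 102a99
  "f20f2cf8"  -- cvttsd2si edi,xmm0
  "f20f591588dc0300"  -- mulsd xmm2,QWORD PTR [rip+0x3dc88]
  "f20f5e154ce00300"  -- divsd xmm2,QWORD PTR [rip+0x3e04c]
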